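-- pv_equiv track=rewrite | github.com/emilaxelsson/hydrogenesis | src/utils.py | uniquify_names
-- ===== SOURCE A (Python) =====
-- def uniquify_names(names: list[str]) -> list[str]:
--     """Return a new list of items with unique names by renaming duplicates."""
--     seen: set[str] = set()
--     result: list[str] = []
--
--     for name in names:
--         base_name = name
--         new_name = base_name
--         i = 1
--
--         while new_name in seen:
--             # if new_name == base_name
--             new_name = f"{base_name}{i}"
--             i += 1
--
--         seen.add(new_name)
--         result.append(new_name)
--
--     return result
-- ===== SOURCE B (Python) =====
-- def uniquify_names(names: list[str]) -> list[str]: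
--     """Return a new list of items with unique names by renaming duplicates.
--
--     Faster re-implementation: a per-base dict remembers the next suffix to try
--     for each base name, so the scan for a free suffix resumes where the last
--     rename of that base stopped instead of restarting at 1 (amortized O(1)
--     probes per item).  The result is produced by mapping a stateful picker
--     over the input instead of an explicit result-accumulator loop.
--     """
--     seen: set[str] = set()
--     next_i: dict[str, int] = {}
--
--     def pick(name: str) -> str:
--         if name in seen:
--             i = next_i.get(name, 1)
--             while f"{name}{i}" in seen:
--                 i += 1
--             next_i[name] = i + 1
--             name = f"{name}{i}"
--         seen.add(name)
--         return name
--
--     return [pick(name) for name in names]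
-- ===== Notes on version B (the rewrite author's own statement) =====
-- stated objective: faster
-- what changed: B memoizes a per-base next-suffix counter in a dict so the free-suffix scan resumes where the previous rename of the same base stopped instead of restarting at 1, and produces the output by mapping a stateful picker over the input instead of an accumulator loop.
import Mathlib
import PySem

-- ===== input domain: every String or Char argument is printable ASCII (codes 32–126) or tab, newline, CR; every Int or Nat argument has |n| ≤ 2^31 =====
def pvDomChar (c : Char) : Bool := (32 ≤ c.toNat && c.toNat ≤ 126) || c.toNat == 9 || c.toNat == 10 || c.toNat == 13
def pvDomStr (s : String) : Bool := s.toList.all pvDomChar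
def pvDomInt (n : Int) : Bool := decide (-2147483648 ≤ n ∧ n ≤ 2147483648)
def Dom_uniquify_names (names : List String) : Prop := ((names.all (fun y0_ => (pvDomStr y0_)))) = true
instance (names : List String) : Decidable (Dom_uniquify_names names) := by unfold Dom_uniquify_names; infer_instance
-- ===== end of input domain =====

-- B memoizes a per-base next-suffix counter in a dict (scan resumes instead of restarting at 1)
-- and maps a stateful picker over the input instead of an accumulator loop (objective: faster, asymptotic).


-- ===== PORT A =====
-- A's inner 'while new_name in seen' loop; fuel seen.length + 1 always suffices
-- (within |seen|+1 distinct candidates one is free; proved below).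
def pvWhileA (seen : PySem.Set String) (base : String) : String → Int → Nat → String
  | nm, _, 0 => nm
  | nm, i, Nat.succ f =>
      if nm ∈ seen then pvWhileA seen base (base ++ PySem.Int.toStr i) (i + 1) f else nm

-- one iteration of A's 'for name in names' loop over the state (seen, result)
def pvStepA (st : PySem.Set String × List String) (name : String) :
    PySem.Set String × List String :=
  let new_name := pvWhileA st.1 name name 1 (st.1.length + 1)
  (PySem.Set.add st.1 new_name, st.2 ++ [new_name])

def uniquify_names (names : List String) : List String :=
  (names.foldl pvStepA (PySem.Set.empty, [])).2

-- ===== PORT B =====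
-- B's inner 'while f"{name}{i}" in seen' loop, started at the memoized counter;
-- the same fuel bound suffices.
def pvScan (seen : PySem.Set String) (base : String) : Int → Nat → Int
  | i, 0 => i
  | i, Nat.succ f =>
      if (base ++ PySem.Int.toStr i) ∈ seen then pvScan seen base (i + 1) f else i

-- Source B's 'pick': chooses the (possibly renamed) name and returns the updated state
def pvPick (seen : PySem.Set String) (ctr : PySem.Dict String Int) (name : String) :
    String × PySem.Set String × PySem.Dict String Int :=
  if name ∈ seen then
    let i := pvScan seen name (ctr.getD name 1) (seen.length + 1)
    let nm := name ++ PySem.Int.toStr i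
    (nm, PySem.Set.add seen nm, ctr.insert name (i + 1))
  else
    (name, PySem.Set.add seen name, ctr)

-- Source B's comprehension '[pick(name) for name in names]' threading the picker's state
def pvGo : List String → PySem.Set String → PySem.Dict String Int → List String
  | [], _, _ => []
  | n :: rest, seen, ctr =>
      let p := pvPick seen ctr n
      p.1 :: pvGo rest p.2.1 p.2.2

def uniquify_names_alt (names : List String) : List String :=
  pvGo names PySem.Set.empty PySem.Dict.empty

-- ===== PRECONDITION & SPEC =====
def Spec_uniquify_names (names : List String) (out : List String) : Prop := out = uniquify_names_alt names
instance (names : List String) (out : List String) : Decidable (Spec_uniquify_names names out) := by unfold Spec_uniquify_names; infer_instance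

-- ===== CLAIM (what is proved, stated in full; the proofs are below) =====
def Claim_equal_uniquify_names : Prop := ∀ (names : List String), Dom_uniquify_names names → Spec_uniquify_names names (uniquify_names names)

-- ===== LEMMAS AND PROOFS =====

-- the candidate name tried at index i
def pvCand (b : String) (i : Int) : String := b ++ PySem.Int.toStr i

-- decoding a decimal digit string back to its value, to prove Nat.toDigits 10 injective
def pvVal (cs : List Char) : Nat := cs.foldl (fun a c => a * 10 + (c.toNat - 48)) 0

theorem pvVal_append_singleton (cs : List Char) (c : Char) :
    pvVal (cs ++ [c]) = pvVal cs * 10 + (c.toNat - 48) := by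
  simp [pvVal]

theorem pvVal_toDigits (n : Nat) : pvVal (Nat.toDigits 10 n) = n := by
  induction n using Nat.strong_induction_on with
  | _ n ih =>
    by_cases h : n < 10
    · rw [Nat.toDigits_of_lt_base h]
      interval_cases n <;> decide
    · rw [Nat.toDigits_of_base_le (by omega) (by omega), pvVal_append_singleton,
        ih (n / 10) (by omega)]
      have h10 : n % 10 < 10 := Nat.mod_lt _ (by omega)
      have : (n % 10).digitChar.toNat - 48 = n % 10 := by
        interval_cases h : n % 10 <;> decide
      omega

theorem pvToDigits_inj {m n : Nat} (h : Nat.toDigits 10 m = Nat.toDigits 10 n) : m = n := by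
  rw [← pvVal_toDigits m, ← pvVal_toDigits n, h]

theorem pvCand_inj {b : String} {i j : Int} (hi : 1 ≤ i) (hj : 1 ≤ j)
    (h : pvCand b i = pvCand b j) : i = j := by
  have h' := congrArg String.toList h
  simp only [pvCand, String.toList_append] at h'
  have h2 : (PySem.Int.toStr i).toList = (PySem.Int.toStr j).toList :=
    List.append_cancel_left h'
  rw [PySem.Int.toList_toStr, PySem.Int.toList_toStr] at h2
  simp only [PySem.Int.toChars, if_neg (by omega : ¬ i < 0), if_neg (by omega : ¬ j < 0)] at h2
  have := pvToDigits_inj h2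
  omega

-- pigeonhole: among |seen| + 1 distinct candidates one is not in the (duplicate-free) set
theorem pvExists_free (seen : PySem.Set String) (b : String) (i : Int)
    (hi : 1 ≤ i) : ∃ k : Nat, pvCand b (i + k) ∉ seen ∧ k ≤ seen.length := by
  by_contra hcon
  push Not at hcon
  set L := seen.length with hL
  have hall : ∀ k : Nat, k ≤ L → pvCand b (i + k) ∈ seen := by
    intro k hk
    by_contra hfree
    exact absurd (hcon k hfree) (by omega)
  have hnodup : ((List.range (L + 1)).map (fun k : Nat => pvCand b (i + (k : Int)))).Nodup := by
    refine List.Nodup.map_on ?_ (List.nodup_range)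
    intro x _ y _ hxy
    have := pvCand_inj (b := b) (i := i + x) (j := i + y) (by omega) (by omega) hxy
    omega
  have hsub : ((List.range (L + 1)).map (fun k : Nat => pvCand b (i + (k : Int)))) ⊆ seen := by
    intro x hx
    simp only [List.mem_map, List.mem_range] at hx
    obtain ⟨k, hk, rfl⟩ := hx
    exact hall k (by omega)
  have := (hnodup.subperm hsub).length_le
  simp only [List.length_map, List.length_range] at this
  omega

theorem pvScan_spec (seen : PySem.Set String) (b : String) (i : Int) (f : Nat)
    (hP : ∃ k : Nat, pvCand b (i + k) ∉ seen) (hf : Nat.find hP ≤ f) :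
    pvScan seen b i f = i + Nat.find hP := by
  induction f generalizing i with
  | zero =>
    have h0 : Nat.find hP = 0 := by omega
    simp [pvScan, h0]
  | succ f ihf =>
    by_cases hmem : pvCand b i ∈ seen
    · have h0 : ¬ pvCand b (i + (0 : Nat)) ∉ seen := by simpa using hmem
      have hpos : 0 < Nat.find hP := by
        rcases Nat.eq_zero_or_pos (Nat.find hP) with h | h
        · exact absurd (Nat.find_spec hP) (by rw [h]; exact not_not_intro (by simpa using hmem))
        · exact h
      have hP' : ∃ k : Nat, pvCand b (i + 1 + k) ∉ seen := by
        refine ⟨Nat.find hP - 1, ?_⟩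
        have := Nat.find_spec hP
        have harg : i + 1 + ((Nat.find hP - 1 : Nat) : Int) = i + (Nat.find hP : Int) := by
          push_cast [Nat.cast_sub hpos]; ring
        rwa [harg]
      have hfind' : Nat.find hP' = Nat.find hP - 1 := by
        rw [Nat.find_eq_iff]
        constructor
        · have := Nat.find_spec hP
          have harg : i + 1 + ((Nat.find hP - 1 : Nat) : Int) = i + (Nat.find hP : Int) := by
            push_cast [Nat.cast_sub hpos]; ring
          rwa [harg]
        · intro m hm
          have hmin := Nat.find_min hP (m := m + 1) (by omega)
          have harg : i + 1 + (m : Int) = i + ((m + 1 : Nat) : Int) := by push_cast; ring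
          rw [not_not] at hmin
          rw [harg]
          exact not_not_intro hmin
      have := ihf (i + 1) hP' (by omega)
      simp only [pvScan]
      rw [if_pos (by simpa [pvCand] using hmem), this, hfind']
      push_cast [Nat.cast_sub hpos]
      ring
    · have h0 : pvCand b (i + ((0 : Nat) : Int)) ∉ seen := by simpa using hmem
      have hfind : Nat.find hP = 0 := by
        rw [Nat.find_eq_iff]; exact ⟨h0, by omega⟩
      simp only [pvScan]
      rw [if_neg (by simpa [pvCand] using hmem), hfind]
      simp

theorem pvWhileA_eq_scan (seen : PySem.Set String) (b : String) (f : Nat) :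
    ∀ j : Int, pvWhileA seen b (pvCand b j) (j + 1) f = pvCand b (pvScan seen b j f) := by
  induction f with
  | zero => intro j; simp [pvWhileA, pvScan]
  | succ f ihf =>
    intro j
    by_cases hmem : pvCand b j ∈ seen
    · simp only [pvWhileA, pvScan]
      rw [if_pos hmem, if_pos (by simpa [pvCand] using hmem)]
      have := ihf (j + 1)
      simpa [pvCand] using this
    · simp only [pvWhileA, pvScan]
      rw [if_neg hmem, if_neg (show ¬ (b ++ PySem.Int.toStr j) ∈ seen by simpa [pvCand] using hmem)]

-- least free index from a equals least free index from b when all of [a, b) is occupied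
theorem pvFind_shift (seen : PySem.Set String) (bs : String) (a b : Int) (hab : a ≤ b)
    (hocc : ∀ j : Int, a ≤ j → j < b → pvCand bs j ∈ seen)
    (hPa : ∃ k : Nat, pvCand bs (a + k) ∉ seen) (hPb : ∃ k : Nat, pvCand bs (b + k) ∉ seen) :
    a + (Nat.find hPa : Int) = b + (Nat.find hPb : Int) := by
  have hspa := Nat.find_spec hPa
  have hspb := Nat.find_spec hPb
  have hge : b ≤ a + (Nat.find hPa : Int) := by
    by_contra hlt
    push Not at hlt
    exact hspa (hocc _ (by omega) (by omega))
  have h1 : (Nat.find hPb : Int) ≤ a + (Nat.find hPa : Int) - b := by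
    have hk : pvCand bs (b + (((a + (Nat.find hPa : Int) - b).toNat : Nat) : Int)) ∉ seen := by
      have : b + (((a + (Nat.find hPa : Int) - b).toNat : Nat) : Int) = a + (Nat.find hPa : Int) := by
        omega
      rwa [this]
    have := Nat.find_le (h := hPb) hk
    omega
  have h2 : (Nat.find hPa : Int) ≤ b + (Nat.find hPb : Int) - a := by
    have hk : pvCand bs (a + (((b + (Nat.find hPb : Int) - a).toNat : Nat) : Int)) ∉ seen := by
      have : a + (((b + (Nat.find hPb : Int) - a).toNat : Nat) : Int) = b + (Nat.find hPb : Int) := by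
        omega
      rwa [this]
    have := Nat.find_le (h := hPa) hk
    omega
  omega

-- the loop invariant tying B's counter dict to the shared seen-set
def pvInv (seen : PySem.Set String) (ctr : PySem.Dict String Int) : Prop :=
  ∀ b : String, 1 ≤ ctr.getD b 1 ∧
    ∀ j : Int, 1 ≤ j → j < ctr.getD b 1 → pvCand b j ∈ seen

theorem pvPick_eq (seen : PySem.Set String) (ctr : PySem.Dict String Int)
    (name : String) (hinv : pvInv seen ctr) :
    pvWhileA seen name name 1 (seen.length + 1) = (pvPick seen ctr name).1 ∧
    PySem.Set.add seen (pvPick seen ctr name).1 = (pvPick seen ctr name).2.1 ∧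
    pvInv (pvPick seen ctr name).2.1 (pvPick seen ctr name).2.2 := by
  by_cases hmem : name ∈ seen
  · obtain ⟨k1, hk1free, hk1le⟩ := pvExists_free seen name 1 (by omega)
    have hP1 : ∃ k : Nat, pvCand name (1 + (k : Int)) ∉ seen := ⟨k1, hk1free⟩
    have hfind1 : Nat.find hP1 ≤ seen.length := le_trans (Nat.find_le hk1free) hk1le
    have h1i0 : 1 ≤ ctr.getD name 1 := (hinv name).1
    obtain ⟨km, hkmfree, hkmle⟩ := pvExists_free seen name (ctr.getD name 1) h1i0
    have hPm : ∃ k : Nat, pvCand name (ctr.getD name 1 + (k : Int)) ∉ seen := ⟨km, hkmfree⟩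
    have hfindm : Nat.find hPm ≤ seen.length := le_trans (Nat.find_le hkmfree) hkmle
    have hshift : 1 + (Nat.find hP1 : Int) = ctr.getD name 1 + (Nat.find hPm : Int) :=
      pvFind_shift seen name 1 (ctr.getD name 1) h1i0
        (fun j hj hlt => (hinv name).2 j hj hlt) hP1 hPm
    have hB : pvScan seen name (ctr.getD name 1) (seen.length + 1) =
        ctr.getD name 1 + (Nat.find hPm : Int) :=
      pvScan_spec seen name (ctr.getD name 1) (seen.length + 1) hPm (by omega)
    have hA : pvWhileA seen name name 1 (seen.length + 1) =
        pvCand name (1 + (Nat.find hP1 : Int)) := by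
      simp only [pvWhileA]
      rw [if_pos hmem]
      have h0 := pvWhileA_eq_scan seen name seen.length 1
      simp only [pvCand] at h0
      rw [h0, pvScan_spec seen name 1 seen.length hP1 (by omega)]
      rfl
    have hpick : pvPick seen ctr name =
        (name ++ PySem.Int.toStr (pvScan seen name (ctr.getD name 1) (seen.length + 1)),
         PySem.Set.add seen
           (name ++ PySem.Int.toStr (pvScan seen name (ctr.getD name 1) (seen.length + 1))),
         ctr.insert name (pvScan seen name (ctr.getD name 1) (seen.length + 1) + 1)) := by
      simp only [pvPick, if_pos hmem]
    refine ⟨?_, ?_, ?_⟩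
    · rw [hpick, hA, hB, hshift]
      rfl
    · rw [hpick]
    · rw [hpick]
      intro b
      by_cases hb : b = name
      · subst hb
        rw [PySem.Dict.getD_insert_self, hB]
        refine ⟨by omega, ?_⟩
        intro j hj hlt
        rw [PySem.Set.mem_add]
        by_cases hjlt : j < ctr.getD b 1
        · exact Or.inl ((hinv b).2 j hj hjlt)
        · push Not at hjlt
          by_cases hje : j = ctr.getD b 1 + (Nat.find hPm : Int)
          · exact Or.inr (by rw [hje]; rfl)
          · refine Or.inl ?_
            have hk : ((j - ctr.getD b 1).toNat : Nat) < Nat.find hPm := by omega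
            have hmin := Nat.find_min hPm hk
            rw [not_not] at hmin
            have harg : ctr.getD b 1 + (((j - ctr.getD b 1).toNat : Nat) : Int) = j := by
              omega
            rwa [harg] at hmin
      · rw [PySem.Dict.getD_insert_of_ne (hne := hb)]
        refine ⟨(hinv b).1, ?_⟩
        intro j hj hlt
        rw [PySem.Set.mem_add]
        exact Or.inl ((hinv b).2 j hj hlt)
  · have hA : pvWhileA seen name name 1 (seen.length + 1) = name := by
      simp only [pvWhileA]
      rw [if_neg hmem]
    have hpick : pvPick seen ctr name = (name, PySem.Set.add seen name, ctr) := by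
      simp only [pvPick, if_neg hmem]
    refine ⟨by rw [hpick, hA], by rw [hpick], ?_⟩
    rw [hpick]
    intro b
    refine ⟨(hinv b).1, ?_⟩
    intro j hj hlt
    rw [PySem.Set.mem_add]
    exact Or.inl ((hinv b).2 j hj hlt)

theorem pvFold_eq (names : List String) (seen : PySem.Set String)
    (ctr : PySem.Dict String Int) (res : List String) (hinv : pvInv seen ctr) :
    (names.foldl pvStepA (seen, res)).2 = res ++ pvGo names seen ctr := by
  induction names generalizing seen ctr res with
  | nil => simp [pvGo]
  | cons name rest ih =>
    obtain ⟨h1, h2, h3⟩ := pvPick_eq seen ctr name hinv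
    simp only [List.foldl_cons]
    have hA : pvStepA (seen, res) name =
        ((pvPick seen ctr name).2.1, res ++ [(pvPick seen ctr name).1]) := by
      simp only [pvStepA, h1, h2]
    rw [hA, ih _ _ _ h3]
    simp [pvGo]

-- ===== VERDICT (by name: the statement is the Claim_ definition above) =====
theorem uniquify_names_spec : Claim_equal_uniquify_names := by
  intro names _
  unfold Spec_uniquify_names uniquify_names uniquify_names_alt
  rw [pvFold_eq names PySem.Set.empty PySem.Dict.empty [] ?_]
  · simp
  · intro b
    refine ⟨by simp [PySem.Dict.getD_empty], ?_⟩
    intro j hj hlt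
    simp [PySem.Dict.getD_empty] at hlt
    omega
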